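-- pv_equiv track=rewrite | github.com/soohyeon21/study | BaekJoon/python_101to150/23_b2_5176.py | cannot_attend
-- ===== SOURCE A (Python) =====
-- def cannot_attend(many, number): # many = m, number = want
--     cannot = 0
--     people = [x for x in range(1, many+1)]
--     for num in number:
--         if (num in people):
--             people.remove(num)
--         else:
--             cannot += 1
--     return cannot
-- ===== SOURCE B (Python) =====
-- def cannot_attend(many, number): # many = m, number = want
--     total = 0
--     valid = set()
--     for num in number:
--         total += 1
--         if 1 <= num <= many:
--             valid.add(num)
--     return total - len(valid)
-- ===== Notes on version B (the rewrite author's own statement) =====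
-- stated objective: faster
-- what changed: Instead of materialising the list 1..many and simulating list removals with repeated linear membership tests and list.remove, B makes one pass keeping only a total counter and a set of the distinct valid values, returning total minus the set size.
import Mathlib
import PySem

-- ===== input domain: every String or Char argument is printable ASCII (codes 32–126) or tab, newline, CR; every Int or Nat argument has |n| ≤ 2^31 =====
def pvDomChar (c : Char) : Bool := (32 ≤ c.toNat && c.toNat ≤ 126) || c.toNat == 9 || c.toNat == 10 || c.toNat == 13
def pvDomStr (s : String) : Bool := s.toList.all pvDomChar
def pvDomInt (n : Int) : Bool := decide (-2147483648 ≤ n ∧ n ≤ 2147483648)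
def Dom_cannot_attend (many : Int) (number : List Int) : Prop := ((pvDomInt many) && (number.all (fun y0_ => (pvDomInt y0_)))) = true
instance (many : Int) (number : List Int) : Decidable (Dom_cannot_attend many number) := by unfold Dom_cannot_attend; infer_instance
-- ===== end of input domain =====

-- B replaces A's list-of-people simulation (linear membership test + list.remove per element)
-- by one pass with a counter and a set of distinct valid values: total - |valid set|.

-- ===== PORT A =====
def cannot_attend (many : Int) (number : List Int) : Int :=
  let people := PySem.List.pyRange 1 (many + 1) 1
  (number.foldl (fun (s : Int × List Int) num =>
      if num ∈ s.2 then (s.1, (PySem.List.remove? s.2 num).getD s.2)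
      else (s.1 + 1, s.2)) (0, people)).1

-- ===== PORT B =====
def cannot_attend_alt (many : Int) (number : List Int) : Int :=
  let st := number.foldl (fun (s : Int × PySem.Set Int) num =>
      (s.1 + 1, if 1 ≤ num ∧ num ≤ many then PySem.Set.add s.2 num else s.2))
    ((0 : Int), (PySem.Set.empty : PySem.Set Int))
  st.1 - PySem.Set.len st.2

-- ===== PRECONDITION & SPEC =====
def Spec_cannot_attend (many : Int) (number : List Int) (out : Int) : Prop := out = cannot_attend_alt many number
instance (many : Int) (number : List Int) (out : Int) : Decidable (Spec_cannot_attend many number out) := by unfold Spec_cannot_attend; infer_instance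

-- ===== CLAIM (what is proved, stated in full; the proofs are below) =====
def Claim_equal_cannot_attend : Prop := ∀ (many : Int) (number : List Int), Dom_cannot_attend many number → Spec_cannot_attend many number (cannot_attend many number)

-- ===== LEMMAS AND PROOFS =====

theorem cannot_attend_inv (many : Int) (number : List Int) :
    ∀ (c t : Int) (p v : List Int), p.Nodup → v.Nodup →
    (∀ x, x ∈ p ↔ (1 ≤ x ∧ x ≤ many ∧ x ∉ v)) →
    c = t - v.length →
    (number.foldl (fun (s : Int × List Int) num =>
        if num ∈ s.2 then (s.1, (PySem.List.remove? s.2 num).getD s.2)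
        else (s.1 + 1, s.2)) (c, p)).1 =
    (let st := number.foldl (fun (s : Int × PySem.Set Int) num =>
        (s.1 + 1, if 1 ≤ num ∧ num ≤ many then PySem.Set.add s.2 num else s.2)) (t, v)
     st.1 - PySem.Set.len st.2) := by
  induction number with
  | nil =>
    intro c t p v _ _ _ hc
    simpa [PySem.Set.len] using hc
  | cons num rest ih =>
    intro c t p v hp hv hmem hc
    simp only [List.foldl_cons]
    by_cases hin : num ∈ p
    · have hval := (hmem num).mp hin
      have herase : (PySem.List.remove? p num).getD p = p.erase num := by
        rw [PySem.List.remove?_eq_some_erase p num hin]; rfl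
      rw [if_pos hin, if_pos ⟨hval.1, hval.2.1⟩, herase,
        PySem.Set.add_of_not_mem hval.2.2]
      exact ih c (t + 1) (p.erase num) (v ++ [num]) (hp.erase num)
        (by
          refine hv.append (List.nodup_singleton _) ?_
          intro a ha hb
          rw [List.mem_singleton] at hb
          exact hval.2.2 (hb ▸ ha))
        (by
          intro x
          rw [hp.mem_erase_iff, hmem x]
          simp only [List.mem_append, List.mem_singleton]
          constructor
          · rintro ⟨hne, h1, h2, h3⟩; exact ⟨h1, h2, by simp [h3, hne]⟩
          · rintro ⟨h1, h2, h3⟩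
            push Not at h3
            exact ⟨h3.2, h1, h2, h3.1⟩)
        (by simp only [List.length_append, List.length_singleton]; push_cast; omega)
    · rw [if_neg hin]
      have hvsame : (if 1 ≤ num ∧ num ≤ many then PySem.Set.add v num else v) = v := by
        split_ifs with hval
        · have : num ∈ v := by
            by_contra hnv
            exact hin ((hmem num).mpr ⟨hval.1, hval.2, hnv⟩)
          exact PySem.Set.add_of_mem this
        · rfl
      rw [hvsame]
      exact ih (c + 1) (t + 1) p v hp hv hmem (by omega)

-- ===== VERDICT (by name: the statement is the Claim_ definition above) =====
theorem cannot_attend_spec : Claim_equal_cannot_attend := by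
  intro many number _
  unfold Spec_cannot_attend cannot_attend cannot_attend_alt
  exact cannot_attend_inv many number 0 0 _ [] (PySem.List.nodup_pyRange_one 1 (many + 1))
    List.nodup_nil
    (by intro x; simp only [PySem.List.mem_pyRange_one, List.not_mem_nil, not_false_iff, and_true]; omega)
    (by simp)
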